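-- pv_equiv track=rewrite | github.com/Krissuper11/Python | TK/tk1/exam.py | word_numeration
-- ===== SOURCE A (Python) =====
-- def word_numeration(words: list) -> list:
--     """
--     For a given list of string, add numeration for every string.
--
--     The input list consists of strings. For every element in the input list,
--     the output list adds a numeration after the string.
--     The format is as follows: #N, where N starts from 1.
--     String comparison should be case-insensitive.
--     The case of symbols in string itself in output list should remain the same as in input list.
--
--     The output list has the same amount of elements as the input list.
--     For every element in the output list, "#N" is added, where N = 1, 2, 3, ...
--
--     :param words: A list of strings.
--     :return: List of string with numeration.
--     """
--     word_dict = {}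
--     new_list = []
--     for element in words:
--         lowercase_element = element.lower()
--         if lowercase_element in word_dict:
--             word_dict[lowercase_element] += 1
--         else:
--             word_dict[lowercase_element] = 1
--         new_list.append(f"{element}#{word_dict[lowercase_element]}")
--     return new_list
-- ===== SOURCE B (Python) =====
-- def word_numeration(words: list) -> list:
--     """Numerate repeated strings case-insensitively (prefix-count formulation).
--
--     Alternative: instead of a running counter dict, count each word's
--     lowercased occurrences in the lowercased prefix up to its position.
--     """
--     lowers = [w.lower() for w in words]
--     return [f"{w}#{lowers[:i + 1].count(lw)}"
--             for i, (w, lw) in enumerate(zip(words, lowers))]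
-- ===== Notes on version B (the rewrite author's own statement) =====
-- stated objective: simpler
-- what changed: Replaces the running counter dict and append loop with a two-line comprehension that counts each word's lowercased occurrences in the lowercased prefix.
import Mathlib
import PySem

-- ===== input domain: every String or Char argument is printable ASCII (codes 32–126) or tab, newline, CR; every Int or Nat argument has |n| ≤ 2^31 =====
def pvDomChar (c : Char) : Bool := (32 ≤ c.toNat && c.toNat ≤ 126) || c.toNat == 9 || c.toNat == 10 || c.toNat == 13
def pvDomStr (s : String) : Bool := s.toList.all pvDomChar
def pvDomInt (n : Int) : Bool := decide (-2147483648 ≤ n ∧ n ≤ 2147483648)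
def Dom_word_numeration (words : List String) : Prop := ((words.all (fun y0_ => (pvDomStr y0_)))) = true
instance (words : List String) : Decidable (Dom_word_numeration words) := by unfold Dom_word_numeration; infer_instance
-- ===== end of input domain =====

-- B replaces A's running counter dict with a prefix-count comprehension (objective: simpler; same results).

-- ===== PORT A =====
-- literal transliteration of A: fold carrying (word_dict, new_list)
def word_numeration (words : List String) : List String :=
  (words.foldl
    (fun (st : PySem.Dict String Int × List String) element =>
      let lw := PySem.Str.lower element
      let wd := if st.1.contains lw then st.1.modify lw 0 (· + 1) else st.1.insert lw 1
      (wd, st.2 ++ [element ++ "#" ++ PySem.Int.toStr (wd.getD lw 0)]))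
    (PySem.Dict.empty, [])).2

-- ===== PORT B =====
-- literal transliteration of B: lowers list, then enumerate(zip(words, lowers)) with a prefix count
def word_numeration_alt (words : List String) : List String :=
  let lowers := words.map PySem.Str.lower
  (PySem.List.enumerate (words.zip lowers)).map (fun p =>
    p.2.1 ++ "#" ++ PySem.Int.toStr (((PySem.List.slice lowers none (some (p.1 + 1))).count p.2.2 : Int)))

-- ===== PRECONDITION & SPEC =====
def Spec_word_numeration (words : List String) (out : List String) : Prop := out = word_numeration_alt words
instance (words : List String) (out : List String) : Decidable (Spec_word_numeration words out) := by unfold Spec_word_numeration; infer_instance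

-- ===== CLAIM (what is proved, stated in full; the proofs are below) =====
def Claim_equal_word_numeration : Prop := ∀ (words : List String), Dom_word_numeration words → Spec_word_numeration words (word_numeration words)

-- ===== LEMMAS AND PROOFS =====

-- A's loop, written recursively with the dict threaded through
def goA (d : PySem.Dict String Int) : List String → List String
  | [] => []
  | w :: ws =>
      let lw := PySem.Str.lower w
      let wd := if d.contains lw then d.modify lw 0 (· + 1) else d.insert lw 1
      (w ++ "#" ++ PySem.Int.toStr (wd.getD lw 0)) :: goA wd ws

-- the common reference form: numeration with an explicit processed prefix
def refGo (pre : List String) : List String → List String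
  | [] => []
  | w :: ws =>
      (w ++ "#" ++ PySem.Int.toStr ((((pre ++ [w]).map PySem.Str.lower).count (PySem.Str.lower w) : Int)))
        :: refGo (pre ++ [w]) ws

lemma foldlA_eq_goA (ws : List String) (d : PySem.Dict String Int) (acc : List String) :
    (ws.foldl
      (fun (st : PySem.Dict String Int × List String) element =>
        let lw := PySem.Str.lower element
        let wd := if st.1.contains lw then st.1.modify lw 0 (· + 1) else st.1.insert lw 1
        (wd, st.2 ++ [element ++ "#" ++ PySem.Int.toStr (wd.getD lw 0)]))
      (d, acc)).2 = acc ++ goA d ws := by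
  induction ws generalizing d acc with
  | nil => simp [goA]
  | cons w ws ih => simp [goA, ih, List.append_assoc]

-- A's contains/insert branch is exactly the counter update
lemma step_eq_modify (d : PySem.Dict String Int) (lw : String) :
    (if d.contains lw then d.modify lw 0 (· + 1) else d.insert lw 1) = d.modify lw 0 (· + 1) := by
  by_cases h : d.contains lw
  · rw [if_pos h]
  · have hf : d.contains lw = false := by simpa using h
    have h0 : d.getD lw 0 = 0 := PySem.Dict.getD_of_not_contains d 0 hf
    simp only [PySem.Dict.insert, PySem.Dict.modify, hf, h0]
    norm_num

lemma goA_counter (ws pre : List String) :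
    goA (PySem.Dict.counter (pre.map PySem.Str.lower)) ws = refGo pre ws := by
  induction ws generalizing pre with
  | nil => rfl
  | cons w ws ih =>
    have hcnt : (PySem.Dict.counter (pre.map PySem.Str.lower)).modify (PySem.Str.lower w) 0 (· + 1)
        = PySem.Dict.counter ((pre ++ [w]).map PySem.Str.lower) := by
      rw [List.map_append]
      exact (PySem.Dict.counter_append_singleton _ _).symm
    simp only [goA, refGo]
    rw [step_eq_modify, hcnt, PySem.Dict.getD_counter]
    exact congrArg₂ _ rfl (ih (pre ++ [w]))

lemma alt_eq_refGo (ws pre : List String) :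
    (PySem.List.enumerate (ws.zip (ws.map PySem.Str.lower)) (pre.length : Int)).map (fun p =>
      p.2.1 ++ "#" ++ PySem.Int.toStr
        (((PySem.List.slice ((pre ++ ws).map PySem.Str.lower) none (some (p.1 + 1))).count p.2.2 : Int)))
    = refGo pre ws := by
  induction ws generalizing pre with
  | nil => rfl
  | cons w ws ih =>
    simp only [List.map_cons, List.zip_cons_cons, PySem.List.enumerate_cons, List.map_cons, refGo]
    refine List.cons_eq_cons.mpr ⟨?_, ?_⟩
    · -- head element
      have hcast : ((pre.length : Int) + 1) = ((pre.length + 1 : Nat) : Int) := by push_cast; ring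
      rw [hcast, PySem.List.slice_to_natCast]
      have hsplit : pre ++ w :: ws = (pre ++ [w]) ++ ws := by simp
      rw [hsplit, List.map_append, List.take_left' (by simp)]
    · -- tail: shift the prefix
      have hstart : ((pre.length : Int) + 1) = (((pre ++ [w]).length : Nat) : Int) := by
        simp
      have hlist : pre ++ w :: ws = (pre ++ [w]) ++ ws := by simp
      rw [hstart, hlist]
      exact ih (pre ++ [w])

-- ===== VERDICT (by name: the statement is the Claim_ definition above) =====
theorem word_numeration_spec : Claim_equal_word_numeration := by
  intro words _
  unfold Spec_word_numeration word_numeration word_numeration_alt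
  rw [foldlA_eq_goA]
  have h1 : goA PySem.Dict.empty words = refGo [] words := by
    simpa using goA_counter words []
  have h2 := alt_eq_refGo words []
  simp only [List.length_nil, Int.ofNat_zero, List.nil_append] at h2
  simp only [List.nil_append, h1]
  exact h2.symm
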